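-- pv_equiv track=rewrite | github.com/robertdeg/aoc20201 | aoc/week1.py | winning_values
-- ===== SOURCE A (Python) =====
-- from itertools import groupby, chain
--
-- def marked_positions(values: dict, called: set) -> set:
--     return {pos for value, pos in values.items() if value in called}
--
-- def winning_values(values: dict, called: set, dim: int) -> set:
--     positions = marked_positions(values, called)
--     for row, group in groupby(sorted(r for r, c in positions)):
--         if len(list(group)) == dim:
--             return {value for value, (r, c) in values.items() if r == row}
--     for col, group in groupby(sorted(c for r, c in positions)):
--         if len(list(group)) == dim:
--             return {value for value, (r, c) in values.items() if c == col}
--     return set()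
-- ===== SOURCE B (Python) =====
-- def _min_complete(indices, dim):
--     counts = {}
--     for x in indices:
--         counts[x] = counts.get(x, 0) + 1
--     best = None
--     for x, n in counts.items():
--         if n == dim and (best is None or x < best):
--             best = x
--     return best
--
-- def winning_values(values, called, dim):
--     positions = {pos for value, pos in values.items() if value in called}
--     row = _min_complete([r for r, c in positions], dim)
--     if row is not None:
--         return {value for value, (r, c) in values.items() if r == row}
--     col = _min_complete([c for r, c in positions], dim)
--     if col is not None:
--         return {value for value, (r, c) in values.items() if c == col}
--     return set()
-- ===== Notes on version B (the rewrite author's own statement) =====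
-- stated objective: alternative
-- what changed: Replaces sort-then-groupby run-length scanning of rows/columns by one-pass dict counting with a linear minimum over fully-marked indices (O(n) vs O(n log n) asymptotically, though not measurably faster on the probe sizes).
import Mathlib
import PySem

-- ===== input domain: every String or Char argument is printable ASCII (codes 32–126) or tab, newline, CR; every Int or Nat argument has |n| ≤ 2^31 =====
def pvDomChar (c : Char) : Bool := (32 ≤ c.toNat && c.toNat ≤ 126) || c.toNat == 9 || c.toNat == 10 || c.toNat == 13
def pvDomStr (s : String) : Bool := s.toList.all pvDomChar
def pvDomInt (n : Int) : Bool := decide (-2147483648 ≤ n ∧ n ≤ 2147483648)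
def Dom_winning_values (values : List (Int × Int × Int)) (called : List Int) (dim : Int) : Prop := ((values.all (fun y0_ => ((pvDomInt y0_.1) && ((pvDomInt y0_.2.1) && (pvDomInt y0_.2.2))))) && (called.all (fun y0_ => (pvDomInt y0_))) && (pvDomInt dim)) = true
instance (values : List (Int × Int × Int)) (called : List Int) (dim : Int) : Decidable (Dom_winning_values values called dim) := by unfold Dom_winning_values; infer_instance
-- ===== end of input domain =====

-- B replaces A's two sort-then-groupby scans by one-pass dict counting and a linear minimum (objective: alternative; not measurably faster in a timing run).

-- ===== PORT A =====
-- marked_positions: {pos for value, pos in values.items() if value in called}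
def pvMarkedPositions (values : List (Int × Int × Int)) (called : List Int) : List (Int × Int) :=
  PySem.Set.ofList ((values.filter (fun v => called.contains v.1)).map (fun v => v.2))

-- itertools.groupby over a list, paired with len(list(group)) for each group
def pvRuns : List Int → List (Int × Int)
  | [] => []
  | x :: xs =>
    match pvRuns xs with
    | [] => [(x, 1)]
    | (y, n) :: t => if x = y then (y, n + 1) :: t else (x, 1) :: (y, n) :: t

def winning_values (values : List (Int × Int × Int)) (called : List Int) (dim : Int) : List Int :=
  let positions := pvMarkedPositions values called
  match (pvRuns (PySem.List.sorted (positions.map (fun p => p.1)) (fun x => x) false)).find?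
      (fun g => g.2 == dim) with
  | some g => PySem.Set.ofList ((values.filter (fun v => v.2.1 == g.1)).map (fun v => v.1))
  | none =>
    match (pvRuns (PySem.List.sorted (positions.map (fun p => p.2)) (fun x => x) false)).find?
        (fun g => g.2 == dim) with
    | some g => PySem.Set.ofList ((values.filter (fun v => v.2.2 == g.1)).map (fun v => v.1))
    | none => []

-- ===== PORT B =====
-- _min_complete: one-pass dict counting, then linear minimum over indices counted dim times
def pvMinComplete (indices : List Int) (dim : Int) : Option Int :=
  let counts := indices.foldl (fun d x => PySem.Dict.insert d x (PySem.Dict.getD d x 0 + 1)) PySem.Dict.empty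
  counts.items.foldl
    (fun best kn => if kn.2 == dim && (best.elim true (fun b => decide (kn.1 < b))) then some kn.1 else best)
    none

def winning_values_alt (values : List (Int × Int × Int)) (called : List Int) (dim : Int) : List Int :=
  let positions := PySem.Set.ofList ((values.filter (fun v => called.contains v.1)).map (fun v => v.2))
  match pvMinComplete (positions.map (fun p => p.1)) dim with
  | some row => PySem.Set.ofList ((values.filter (fun v => v.2.1 == row)).map (fun v => v.1))
  | none =>
    match pvMinComplete (positions.map (fun p => p.2)) dim with
    | some col => PySem.Set.ofList ((values.filter (fun v => v.2.2 == col)).map (fun v => v.1))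
    | none => []

-- ===== PRECONDITION & SPEC =====
def Spec_winning_values (values : List (Int × Int × Int)) (called : List Int) (dim : Int) (out : List Int) : Prop := out = winning_values_alt values called dim
instance (values : List (Int × Int × Int)) (called : List Int) (dim : Int) (out : List Int) : Decidable (Spec_winning_values values called dim out) := by unfold Spec_winning_values; infer_instance

-- ===== CLAIM (what is proved, stated in full; the proofs are below) =====
def Claim_equal_winning_values : Prop := ∀ (values : List (Int × Int × Int)) (called : List Int) (dim : Int), Dom_winning_values values called dim → Spec_winning_values values called dim (winning_values values called dim)

-- ===== LEMMAS AND PROOFS =====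
-- groupby over a sorted list = the distinct values (strictly increasing) with their multiplicities
theorem pvRuns_sorted (l : List Int) (h : l.Pairwise (· ≤ ·)) :
    ∃ ks : List Int, ks.Pairwise (· < ·) ∧ (∀ v, v ∈ ks ↔ v ∈ l) ∧
      pvRuns l = ks.map (fun v => (v, (l.count v : Int))) := by
  induction l with
  | nil => exact ⟨[], by simp, by simp, rfl⟩
  | cons x xs ih =>
    rw [List.pairwise_cons] at h
    obtain ⟨ks, hlt, hmem, hruns⟩ := ih h.2
    cases ks with
    | nil =>
      have hxs : xs = [] := by
        cases xs with
        | nil => rfl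
        | cons a t => exact absurd ((hmem a).mpr (List.mem_cons_self)) (List.not_mem_nil)
      subst hxs
      exact ⟨[x], by simp, by simp, by simp [pvRuns]⟩
    | cons y t =>
      have hry : pvRuns xs = (y, (xs.count y : Int)) :: t.map (fun v => (v, (xs.count v : Int))) := by
        simpa using hruns
      have hyxs : y ∈ xs := (hmem y).mp (List.mem_cons_self)
      by_cases hxy : x = y
      · refine ⟨y :: t, hlt, ?_, ?_⟩
        · intro v
          constructor
          · intro hv; exact List.mem_cons_of_mem x ((hmem v).mp hv)
          · intro hv
            rcases List.mem_cons.mp hv with hv | hv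
            · subst hv; rw [hxy]; exact List.mem_cons_self
            · exact (hmem v).mpr hv
        · show (match pvRuns xs with
            | [] => [(x, 1)]
            | (y, n) :: t => if x = y then (y, n + 1) :: t else (x, 1) :: (y, n) :: t) = _
          rw [hry]
          simp only [if_pos hxy, List.map_cons]
          subst hxy
          simp only [List.cons.injEq]
          constructor
          · rw [List.count_cons_self]; push_cast; ring
          · apply List.map_congr_left
            intro v hv
            have hne : v ≠ x := by
              intro he; subst he
              exact absurd rfl (ne_of_gt (List.rel_of_pairwise_cons hlt hv))
            rw [List.count_cons_of_ne (Ne.symm hne)]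
      · have hxley : x ≤ y := h.1 y hyxs
        have hxy' : x < y := lt_of_le_of_ne hxley hxy
        have hxnot : x ∉ xs := by
          intro hx
          rcases List.mem_cons.mp ((hmem x).mpr hx) with he | ht
          · exact hxy he
          · exact absurd (List.rel_of_pairwise_cons hlt ht) (not_lt.mpr (le_of_lt hxy'))
        refine ⟨x :: y :: t, ?_, ?_, ?_⟩
        · refine List.pairwise_cons.mpr ⟨?_, hlt⟩
          intro v hv
          rcases List.mem_cons.mp hv with he | ht
          · subst he; exact hxy'
          · exact lt_trans hxy' (List.rel_of_pairwise_cons hlt ht)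
        · intro v
          constructor
          · intro hv
            rcases List.mem_cons.mp hv with he | ht
            · subst he; exact List.mem_cons_self
            · exact List.mem_cons_of_mem x ((hmem v).mp ht)
          · intro hv
            rcases List.mem_cons.mp hv with he | ht
            · subst he; exact List.mem_cons_self
            · exact List.mem_cons_of_mem x ((hmem v).mpr ht)
        · show (match pvRuns xs with
            | [] => [(x, 1)]
            | (y, n) :: t => if x = y then (y, n + 1) :: t else (x, 1) :: (y, n) :: t) = _
          rw [hry]
          simp only [if_neg hxy, List.map_cons]
          simp only [List.cons.injEq]
          constructor
          · rw [List.count_cons_self, List.count_eq_zero_of_not_mem hxnot]; norm_num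
          · constructor
            · rw [List.count_cons_of_ne (ne_of_lt hxy')]
            · apply List.map_congr_left
              intro v hv
              have hne : v ≠ x := by
                intro he; subst he
                exact absurd (lt_trans hxy' (List.rel_of_pairwise_cons hlt hv)) (lt_irrefl _)
              rw [List.count_cons_of_ne (Ne.symm hne)]

-- find? on a strictly increasing list returns the least satisfying element
theorem pvFind_min (q : Int → Bool) :
    ∀ (ks : List Int), ks.Pairwise (· < ·) → ∀ m, ks.find? q = some m →
      ∀ v ∈ ks, q v = true → m ≤ v := by
  intro ks
  induction ks with
  | nil => intro _ m hm; simp at hm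
  | cons k t ih =>
    intro hpw m hm v hv hq
    cases hk : q k with
    | true =>
      simp only [List.find?_cons, hk] at hm
      injection hm with hm; subst hm
      rcases List.mem_cons.mp hv with he | ht
      · subst he; exact le_refl v
      · exact le_of_lt (List.rel_of_pairwise_cons hpw ht)
    | false =>
      simp only [List.find?_cons, hk] at hm
      rcases List.mem_cons.mp hv with he | ht
      · subst he; exact absurd hq (by simp [hk])
      · exact ih (List.pairwise_cons.mp hpw).2 m hm v ht hq

-- the running-minimum fold: none iff no candidate (given empty accumulator)
theorem pvFold_none (q : Int → Bool) :
    ∀ (l : List Int) (acc : Option Int),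
      l.foldl (fun best v => if q v && (best.elim true (fun b => decide (v < b))) then some v else best) acc = none ↔
        acc = none ∧ ∀ v ∈ l, q v = false := by
  intro l
  induction l with
  | nil => intro acc; simp
  | cons x l ih =>
    intro acc
    rw [List.foldl_cons, ih]
    cases hc : (q x && (acc.elim true (fun b => decide (x < b)))) with
    | true =>
      simp only [if_true]
      constructor
      · rintro ⟨h1, _⟩; exact absurd h1 (by simp)
      · rintro ⟨h1, h2⟩
        subst h1
        have hc' := hc
        simp only [Bool.and_eq_true] at hc'
        rw [h2 x List.mem_cons_self] at hc'
        simp at hc'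
    | false =>
      simp only [Bool.false_eq_true, if_false]
      constructor
      · rintro ⟨h1, h2⟩
        refine ⟨h1, fun v hv => ?_⟩
        rcases List.mem_cons.mp hv with he | ht
        · subst he
          subst h1
          cases hq : q v
          · rfl
          · rw [hq] at hc; simp at hc
        · exact h2 v ht
      · rintro ⟨h1, h2⟩
        exact ⟨h1, fun v hv => h2 v (List.mem_cons_of_mem x hv)⟩

-- the running-minimum fold: a some result is a least candidate
theorem pvFold_some (q : Int → Bool) :
    ∀ (l : List Int) (acc : Option Int) (m : Int),
      l.foldl (fun best v => if q v && (best.elim true (fun b => decide (v < b))) then some v else best) acc = some m →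
        (acc = some m ∨ (m ∈ l ∧ q m = true)) ∧ (∀ v ∈ l, q v = true → m ≤ v) ∧
          (∀ b, acc = some b → m ≤ b) := by
  intro l
  induction l with
  | nil =>
    intro acc m hm
    simp only [List.foldl_nil] at hm
    exact ⟨Or.inl hm, by simp, fun b hb => by rw [hm] at hb; injection hb with hb; omega⟩
  | cons x l ih =>
    intro acc m hm
    rw [List.foldl_cons] at hm
    cases hc : (q x && (acc.elim true (fun b => decide (x < b)))) with
    | true =>
      simp only [hc, if_true] at hm
      obtain ⟨hsrc, hmin, hacc⟩ := ih (some x) m hm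
      have hc' := hc
      simp only [Bool.and_eq_true] at hc'
      have hqx : q x = true := hc'.1
      have hmx : m ≤ x := hacc x rfl
      refine ⟨?_, ?_, ?_⟩
      · rcases hsrc with h | h
        · injection h with h; subst h; exact Or.inr ⟨List.mem_cons_self, hqx⟩
        · exact Or.inr ⟨List.mem_cons_of_mem x h.1, h.2⟩
      · intro v hv hqv
        rcases List.mem_cons.mp hv with he | ht
        · subst he; exact hmx
        · exact hmin v ht hqv
      · intro b hb
        subst hb
        have hxb : x < b := by simpa using hc'.2
        omega
    | false =>
      simp only [hc, Bool.false_eq_true, if_false] at hm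
      obtain ⟨hsrc, hmin, hacc⟩ := ih acc m hm
      refine ⟨?_, ?_, hacc⟩
      · rcases hsrc with h | h
        · exact Or.inl h
        · exact Or.inr ⟨List.mem_cons_of_mem x h.1, h.2⟩
      · intro v hv hqv
        rcases List.mem_cons.mp hv with he | ht
        · subst he
          cases h2 : (acc.elim true (fun b => decide (v < b))) with
          | true => rw [hqv, h2] at hc; simp at hc
          | false =>
            cases hacc2 : acc with
            | none => rw [hacc2] at h2; simp at h2
            | some b =>
              rw [hacc2] at h2
              have hbv : b ≤ v := by simpa using h2
              have hmb : m ≤ b := hacc b hacc2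
              omega
        · exact hmin v ht hqv

-- A's sorted+groupby scan and B's counter+minimum fold agree on any index list
theorem pvMain (xs : List Int) (dim : Int) :
    Option.map Prod.fst ((pvRuns (PySem.List.sorted xs (fun x => x) false)).find? (fun g => g.2 == dim))
      = pvMinComplete xs dim := by
  have hperm := PySem.List.sorted_perm xs (fun x => x) false
  have hcount : ∀ v, (PySem.List.sorted xs (fun x => x) false).count v = xs.count v :=
    fun v => hperm.count_eq v
  obtain ⟨ks, hlt, hmem, hruns⟩ := pvRuns_sorted _ (PySem.List.sorted_pairwise xs (fun x => x))
  rw [hruns, List.find?_map, Option.map_map]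
  have hid : (Prod.fst ∘ fun v : Int => (v, ((PySem.List.sorted xs (fun x => x) false).count v : Int))) = id := rfl
  rw [hid, Option.map_id]
  show ks.find? ((fun g : Int × Int => g.2 == dim) ∘ _) = _
  have hq : ((fun g : Int × Int => g.2 == dim) ∘ fun v : Int => (v, ((PySem.List.sorted xs (fun x => x) false).count v : Int)))
      = fun v : Int => ((xs.count v : Int) == dim) := by
    funext v; simp [hcount v]
  rw [hq]
  have hB : pvMinComplete xs dim =
      (PySem.Set.ofList xs).foldl
        (fun best v => if ((xs.count v : Int) == dim) && (best.elim true (fun b => decide (v < b))) then some v else best)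
        none := by
    show ((PySem.Dict.counter xs).items).foldl _ none = _
    rw [PySem.Dict.items_counter, List.foldl_map]
  rw [hB]
  set q : Int → Bool := fun v : Int => ((xs.count v : Int) == dim) with hqdef
  cases hA : ks.find? q with
  | none =>
    cases hBr : (PySem.Set.ofList xs).foldl
        (fun best v => if q v && (best.elim true (fun b => decide (v < b))) then some v else best) none with
    | none => rfl
    | some m =>
      obtain ⟨hsrc, _, _⟩ := pvFold_some q _ none m hBr
      rcases hsrc with h | ⟨hmm, hqm⟩
      · exact absurd h (by simp)
      · have : m ∈ ks := (hmem m).mpr ((PySem.List.mem_sorted xs (fun x => x) false m).mpr ((PySem.Set.mem_ofList xs m).mp hmm))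
        exact absurd hqm (by simpa using (List.find?_eq_none.mp hA) m this)
  | some m =>
    have hqm : q m = true := List.find?_some hA
    have hmk : m ∈ ks := List.mem_of_find?_eq_some hA
    have hmxs : m ∈ xs := (PySem.List.mem_sorted xs (fun x => x) false m).mp ((hmem m).mp hmk)
    cases hBr : (PySem.Set.ofList xs).foldl
        (fun best v => if q v && (best.elim true (fun b => decide (v < b))) then some v else best) none with
    | none =>
      have := (pvFold_none q _ none).mp hBr
      exact absurd hqm (by simp [this.2 m ((PySem.Set.mem_ofList xs m).mpr hmxs)])
    | some m' =>
      obtain ⟨hsrc, hminB, _⟩ := pvFold_some q _ none m' hBr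
      rcases hsrc with h | ⟨hm'm, hqm'⟩
      · exact absurd h (by simp)
      · have hm'xs : m' ∈ xs := (PySem.Set.mem_ofList xs m').mp hm'm
        have h1 : m ≤ m' := pvFind_min q ks hlt m hA m' ((hmem m').mpr ((PySem.List.mem_sorted xs (fun x => x) false m').mpr hm'xs)) hqm'
        have h2 : m' ≤ m := hminB m ((PySem.Set.mem_ofList xs m).mpr hmxs) hqm
        rw [le_antisymm h1 h2]

-- ===== VERDICT (by name: the statement is the Claim_ definition above) =====
theorem winning_values_spec : Claim_equal_winning_values := by
  intro values called dim _
  simp only [Spec_winning_values, winning_values, winning_values_alt]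
  rw [show PySem.Set.ofList ((values.filter (fun v => called.contains v.1)).map (fun v => v.2)) = pvMarkedPositions values called from rfl]
  rw [← pvMain, ← pvMain]
  generalize ((pvRuns (PySem.List.sorted ((pvMarkedPositions values called).map (fun p => p.1)) (fun x => x) false)).find? (fun g => g.2 == dim)) = eR
  generalize ((pvRuns (PySem.List.sorted ((pvMarkedPositions values called).map (fun p => p.2)) (fun x => x) false)).find? (fun g => g.2 == dim)) = eC
  cases eR <;> cases eC <;> rfl
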